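-- pv_equiv track=rewrite | github.com/TaskGuru-AI/tasks_support_system_ai | tasks_support_system_ai/services/nlp/preprocessor.py | split_key
-- ===== SOURCE A (Python) =====
-- def split_key(key_mod):
--     """
--     Splits a normalized string into tokens while preserving punctuation as separate tokens.
--
--     Args:
--         key_mod (str): The cleaned and normalized string to split.
--
--     Returns:
--         list: A list of tokens derived from the input string.
--     """
--     result = []
--     temp_word = []
--
--     for char in key_mod:
--         if char.isalpha() or char.isdigit() or char == "-":
--             temp_word.append(char)
--         elif char == "." or char.isspace():
--             if temp_word:
--                 result.append("".join(temp_word))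
--                 temp_word = []
--             if char == ".":
--                 result.append(".")
--
--     if temp_word:
--         result.append("".join(temp_word))
--
--     return result
-- ===== SOURCE B (Python) =====
-- def split_key(key_mod):
--     cleaned = "".join(
--         " . " if c == "." else c
--         for c in key_mod
--         if c.isalpha() or c.isdigit() or c == "-" or c == "." or c.isspace()
--     )
--     return cleaned.split()
-- ===== Notes on version B (the rewrite author's own statement) =====
-- stated objective: idiomatic
-- what changed: Replaces A's char-by-char state machine with explicit token accumulators by a declarative two-phase pipeline: filter/expand each kept character ('.' becomes ' . ') into a cleaned string, then let str.split() produce the tokens.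
import Mathlib
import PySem

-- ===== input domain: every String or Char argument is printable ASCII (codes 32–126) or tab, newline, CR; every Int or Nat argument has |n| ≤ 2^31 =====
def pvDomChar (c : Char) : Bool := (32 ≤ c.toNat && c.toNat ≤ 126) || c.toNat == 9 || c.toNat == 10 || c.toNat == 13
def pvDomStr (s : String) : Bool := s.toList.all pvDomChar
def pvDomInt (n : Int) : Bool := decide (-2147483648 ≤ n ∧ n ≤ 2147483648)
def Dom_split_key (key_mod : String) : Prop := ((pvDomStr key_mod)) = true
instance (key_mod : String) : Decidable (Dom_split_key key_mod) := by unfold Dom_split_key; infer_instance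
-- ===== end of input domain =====

-- B replaces A's character-level state machine (manual token accumulator) by a declarative
-- filter/expand pass followed by whitespace split(); same cost, more idiomatic.

-- ===== PORT A =====
-- one loop step of A: the `for char in key_mod` body over state (result, temp_word)
def splitKeyStep (st : List String × List Char) (c : Char) : List String × List Char :=
  if PySem.Chars.isalpha c || PySem.Chars.isdigit c || c == '-' then
    (st.1, st.2 ++ [c])
  else if c == '.' || PySem.Chars.isspace c then
    -- `"".join(temp_word)` on a list of single characters is exactly `String.mk st.2`
    let res := if st.2.isEmpty then st.1 else st.1 ++ [String.mk st.2]
    (if c == '.' then res ++ ["."] else res, ([] : List Char))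
  else st

-- the trailing `if temp_word: result.append("".join(temp_word))`
def splitKeyFinish (st : List String × List Char) : List String :=
  if st.2.isEmpty then st.1 else st.1 ++ [String.mk st.2]

def split_key (key_mod : String) : List String :=
  splitKeyFinish (key_mod.toList.foldl splitKeyStep ([], []))

-- ===== PORT B =====
-- B's generator-expression filter: keep letters, digits, '-', '.', whitespace
def keepChar (c : Char) : Bool :=
  PySem.Chars.isalpha c || PySem.Chars.isdigit c || c == '-' || c == '.' || PySem.Chars.isspace c

-- B maps '.' to " . " inside the join; joining one-char/three-char pieces is this flatMap
def expandDot (c : Char) : List Char :=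
  if c == '.' then [' ', '.', ' '] else [c]

def split_key_alt (key_mod : String) : List String :=
  let cleaned := (key_mod.toList.filter keepChar).flatMap expandDot
  (PySem.Chars.split₀ cleaned).map String.mk

-- ===== PRECONDITION & SPEC =====
def Spec_split_key (key_mod : String) (out : List String) : Prop := out = split_key_alt key_mod
instance (key_mod : String) (out : List String) : Decidable (Spec_split_key key_mod out) := by unfold Spec_split_key; infer_instance

-- ===== CLAIM (what is proved, stated in full; the proofs are below) =====
def Claim_equal_split_key : Prop := ∀ (key_mod : String), Dom_split_key key_mod → Spec_split_key key_mod (split_key key_mod)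

-- ===== LEMMAS AND PROOFS =====

-- recursion equations for PySem.Chars.split₀.go (definitional)
theorem splitGo_nil (cur : List Char) (acc : List (List Char)) :
    PySem.Chars.split₀.go [] cur acc =
      if cur.isEmpty then acc.reverse else (cur.reverse :: acc).reverse := rfl

theorem splitGo_cons (c : Char) (rest cur : List Char) (acc : List (List Char)) :
    PySem.Chars.split₀.go (c :: rest) cur acc =
      if PySem.Chars.isspace c then
        (if cur.isEmpty then PySem.Chars.split₀.go rest [] acc
         else PySem.Chars.split₀.go rest [] (cur.reverse :: acc))
      else PySem.Chars.split₀.go rest (c :: cur) acc := rfl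

-- a word character (letter, digit or '-') is neither whitespace nor a period
theorem wordChar_not_space_dot (c : Char)
    (h : (PySem.Chars.isalpha c || PySem.Chars.isdigit c || c == '-') = true) :
    PySem.Chars.isspace c = false ∧ (c == '.') = false := by
  have hA : 'A'.val.toNat = 65 := rfl
  have hZ : 'Z'.val.toNat = 90 := rfl
  have ha : 'a'.val.toNat = 97 := rfl
  have hz : 'z'.val.toNat = 122 := rfl
  have h0 : '0'.val.toNat = 48 := rfl
  have h9 : '9'.val.toNat = 57 := rfl
  have hm : '-'.val.toNat = 45 := rfl
  have hd : '.'.val.toNat = 46 := rfl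
  simp only [PySem.Chars.isalpha, PySem.Chars.isupper, PySem.Chars.islower, PySem.Chars.isdigit,
    PySem.Chars.isspace, Char.toNat, Bool.or_eq_true, Bool.and_eq_true, decide_eq_true_eq,
    Char.le_def, beq_iff_eq, Bool.or_eq_false_iff, Bool.and_eq_false_iff,
    decide_eq_false_iff_not, not_le, UInt32.le_iff_toNat_le, Char.ext_iff, UInt32.ext_iff,
    beq_eq_false_iff_ne, ne_eq] at h ⊢
  omega

-- main invariant: A's remaining fold (with pending word `temp` and emitted tokens
-- `acc.reverse.map String.mk`) equals B's split₀.go on the filtered/expanded remainder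
theorem split_key_invariant (cs : List Char) :
    ∀ (temp : List Char) (acc : List (List Char)),
      splitKeyFinish (cs.foldl splitKeyStep (acc.reverse.map String.mk, temp)) =
        (PySem.Chars.split₀.go ((cs.filter keepChar).flatMap expandDot) temp.reverse acc).map
          String.mk := by
  induction cs with
  | nil =>
    intro temp acc
    cases temp with
    | nil => simp [splitKeyFinish, splitGo_nil]
    | cons t ts => simp [splitKeyFinish, splitGo_nil]
  | cons c cs ih =>
    intro temp acc
    by_cases hw : (PySem.Chars.isalpha c || PySem.Chars.isdigit c || c == '-') = true
    · -- word character: appended to the pending word on both sides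
      obtain ⟨hs, hd⟩ := wordChar_not_space_dot c hw
      have hk : keepChar c = true := by
        simp only [keepChar] at *
        simp only [Bool.or_eq_true] at hw ⊢
        tauto
      simp only [List.foldl_cons, List.filter_cons, hk, List.flatMap_cons, expandDot, hd,
        if_false, List.singleton_append, splitGo_cons, hs, Bool.false_eq_true, if_false,
        splitKeyStep, hw, if_true]
      have := ih (temp ++ [c]) acc
      simpa [List.reverse_append] using this
    · by_cases hd : (c == '.') = true
      · -- period: flush the pending word, emit "." on both sides
        have hc : c = '.' := by simpa using hd
        subst hc
        have hk : keepChar '.' = true := by simp [keepChar]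
        have hs : PySem.Chars.isspace '.' = false := rfl
        have hsp : PySem.Chars.isspace ' ' = true := rfl
        simp only [List.foldl_cons, List.filter_cons, hk, if_true, List.flatMap_cons, expandDot,
          List.cons_append, List.nil_append, splitGo_cons, hsp, if_true,
          splitKeyStep, hw, if_false, beq_self_eq_true, Bool.true_or, if_true, hs,
          Bool.false_eq_true, List.reverse_cons, List.reverse_nil, List.nil_append,
          List.isEmpty_nil]
        cases temp with
        | nil =>
          simpa using ih [] (['.'] :: acc)
        | cons t ts =>
          have := ih [] (['.'] :: (t :: ts) :: acc)
          simpa [List.reverse_append] using this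
      · by_cases hs : PySem.Chars.isspace c = true
        · -- whitespace: flush the pending word on both sides
          have hk : keepChar c = true := by simp [keepChar, hs]
          have hne : (c == '.') = false := by simpa using hd
          simp only [List.foldl_cons, List.filter_cons, hk, if_true, List.flatMap_cons,
            expandDot, hne, Bool.false_eq_true, if_false, List.singleton_append, splitGo_cons,
            hs, if_true, splitKeyStep, hw, if_false]
          cases temp with
          | nil => simpa [hs] using ih [] acc
          | cons t ts =>
            have := ih [] ((t :: ts) :: acc)
            simpa [hs] using this
        · -- any other character: dropped by both sides
          have hk : keepChar c = false := by
            simp only [keepChar]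
            simp only [Bool.or_eq_true, not_or] at hw ⊢
            push Not at hw
            simp only [Bool.or_eq_false_iff]
            refine ⟨⟨⟨⟨?_, ?_⟩, ?_⟩, ?_⟩, ?_⟩ <;>
              simp_all [Bool.not_eq_true]
          simp only [List.foldl_cons, List.filter_cons, hk, Bool.false_eq_true, if_false,
            splitKeyStep, hw, if_false, Bool.or_eq_true]
          have hde : (c == '.') = false := by simpa using hd
          have hse : PySem.Chars.isspace c = false := by simpa using hs
          simp only [hde, hse, Bool.false_eq_true, if_false]
          exact ih temp acc

-- ===== VERDICT (by name: the statement is the Claim_ definition above) =====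
theorem split_key_spec : Claim_equal_split_key := by
  intro key_mod _
  unfold Spec_split_key split_key split_key_alt PySem.Chars.split₀
  have := split_key_invariant key_mod.toList [] []
  simpa using this
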